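-- pv_equiv track=rewrite | github.com/kirk0830/ABACUS-Pseudopot-Nao-Square | apns/module_io/citation.py | fold_row_tolength
-- ===== SOURCE A (Python) =====
-- def fold_row_tolength(source: str, length: int):
--     """fold each line of source if it is longer than length"""
--     origin = source.split("\n")
--     result = ""
--     for line in origin:
--         if len(line) > length:
--             result += line[:length] + "\n"
--             result += fold_row_tolength(line[length:], length)
--         else:
--             result += line + "\n"
--     return result
-- ===== SOURCE B (Python) =====
-- def fold_row_tolength(source: str, length: int):
--     """fold each line of source if it is longer than length"""
--     result = ""
--     for line in source.split("\n"):
--         if len(line) <= length: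
--             result += line + "\n"
--         else:
--             for i in range(0, len(line), length):
--                 result += line[i:i + length] + "\n"
--     return result
-- ===== Notes on version B (the rewrite author's own statement) =====
-- stated objective: simpler
-- what changed: Replaces A's recursion (re-splitting and re-scanning the tail line[length:] at every step) with a flat chunking loop over range(0, len(line), length) per line; no recursion, no repeated split.
import Mathlib
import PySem

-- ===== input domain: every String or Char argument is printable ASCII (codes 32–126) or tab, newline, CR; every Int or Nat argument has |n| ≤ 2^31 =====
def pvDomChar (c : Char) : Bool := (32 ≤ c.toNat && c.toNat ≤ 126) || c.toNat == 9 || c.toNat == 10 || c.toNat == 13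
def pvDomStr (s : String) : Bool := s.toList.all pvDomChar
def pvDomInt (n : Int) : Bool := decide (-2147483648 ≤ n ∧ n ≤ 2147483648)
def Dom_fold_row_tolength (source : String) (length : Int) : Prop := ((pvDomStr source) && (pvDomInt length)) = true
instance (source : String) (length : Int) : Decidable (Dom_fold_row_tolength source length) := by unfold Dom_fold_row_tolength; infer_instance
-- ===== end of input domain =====

-- B replaces A's per-line tail recursion on line[length:] with a flat chunking loop over range(0, len(line), length): simpler, no recursion.


-- ===== PORT A =====
-- literal port of A; the fuel only makes the (on some inputs non-terminating) Python recursion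
-- total — fuel 0 is never reached on inputs satisfying Pre_ (proved below).
def foldAAux : Nat → List Char → Int → List Char
  | 0, _, _ => []
  | fuel+1, src, length =>
    (PySem.Chars.splitOn src ['\n']).foldl
      (fun result line =>
        if length < (line.length : Int) then
          result ++ PySem.List.slice line none (some length) ++ ['\n']
            ++ foldAAux fuel (PySem.List.slice line (some length) none) length
        else
          result ++ line ++ ['\n'])
      []

def fold_row_tolength (source : String) (length : Int) : String :=
  String.ofList (foldAAux (source.toList.length + 1) source.toList length)

-- ===== PORT B =====
def fold_row_tolength_alt (source : String) (length : Int) : String :=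
  String.ofList
    ((PySem.Chars.splitOn source.toList ['\n']).foldl
      (fun result line =>
        if (line.length : Int) ≤ length then
          result ++ line ++ ['\n']
        else
          (PySem.List.pyRange 0 (line.length : Int) length).foldl
            (fun result i =>
              result ++ PySem.List.slice line (some i) (some (i + length)) ++ ['\n'])
            result)
      [])

-- ===== PRECONDITION & SPEC =====
-- Pre_ is exactly where the Python A terminates: for length ≥ 1 always; for length = 0 only when
-- every line is empty (source is all newlines); on every other input A recurses forever on line[length:].
def Pre_fold_row_tolength (source : String) (length : Int) : Prop :=
  1 ≤ length ∨ (length = 0 ∧ source.toList.all (fun c => c == '\n') = true)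
instance (source : String) (length : Int) : Decidable (Pre_fold_row_tolength source length) := by
  unfold Pre_fold_row_tolength; infer_instance
def pvWitness_fold_row_tolength : String × Int := ("abcde\nfg", 2)

def Spec_fold_row_tolength (source : String) (length : Int) (out : String) : Prop := out = fold_row_tolength_alt source length
instance (source : String) (length : Int) (out : String) : Decidable (Spec_fold_row_tolength source length out) := by unfold Spec_fold_row_tolength; infer_instance

-- ===== CLAIM (what is proved, stated in full; the proofs are below) =====
def Claim_equal_fold_row_tolength : Prop := ∀ (source : String) (length : Int), Dom_fold_row_tolength source length → Pre_fold_row_tolength source length → Spec_fold_row_tolength source length (fold_row_tolength source length)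

-- ===== LEMMAS AND PROOFS =====

-- reference chunking of a single (newline-free) line into pieces of Lp+1 characters
def chunksAux (Lp : Nat) : List Char → List Char
  | [] => []
  | c :: rest =>
    if (c :: rest).length ≤ Lp + 1 then (c :: rest) ++ ['\n']
    else ((c :: rest).take (Lp+1)) ++ '\n' :: chunksAux Lp ((c :: rest).drop (Lp+1))
  termination_by l => l.length
  decreasing_by simp

-- splitOn.go invariant: every produced piece is in acc, or is newline-free (given cur is),
-- no longer than cur ++ l, and made of characters of cur or l.
theorem go_inv (fuel : Nat) : ∀ (l cur : List Char) (acc : List (List Char)),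
    l.length < fuel → '\n' ∉ cur →
    ∀ line ∈ PySem.Chars.splitOn.go ['\n'] fuel l cur acc,
      line ∈ acc ∨ ('\n' ∉ line ∧ line.length ≤ cur.length + l.length ∧ ∀ c ∈ line, c ∈ cur ∨ c ∈ l) := by
  induction fuel with
  | zero => intro l cur acc h; omega
  | succ fuel ih =>
    intro l cur acc hf hcur line hm
    match l with
    | [] =>
      rw [PySem.Chars.splitOn.go] at hm
      · simp at hm
        rcases hm with h | h
        · left; exact h
        · right
          subst h
          refine ⟨by simpa using hcur, by simp, ?_⟩
          intro c hc; left; simpa using hc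
      · simp
    | c :: rest =>
      rw [PySem.Chars.splitOn.go] at hm
      by_cases hpre : ['\n'].isPrefixOf (c :: rest) = true
      · rw [if_pos hpre] at hm
        simp only [List.length_singleton, List.drop_succ_cons, List.drop_zero] at hm
        have := ih rest [] (cur.reverse :: acc) (by simp at hf ⊢; omega) (by simp) line hm
        rcases this with h | ⟨h1, h2, h3⟩
        · rcases List.mem_cons.mp h with h | h
          · right
            subst h
            refine ⟨by simpa using hcur, by simp, ?_⟩
            intro x hx; left; simpa using hx
          · left; exact h
        · right
          refine ⟨h1, by simp at h2 ⊢; omega, ?_⟩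
          intro x hx
          rcases h3 x hx with h | h
          · simp at h
          · right; simp [h]
      · rw [if_neg hpre] at hm
        have hc : c ≠ '\n' := by
          intro h; subst h; simp [List.isPrefixOf] at hpre
        have := ih rest (c :: cur) acc (by simp at hf ⊢; omega)
          (by intro h; rcases List.mem_cons.mp h with h | h; exact hc h.symm; exact hcur h) line hm
        rcases this with h | ⟨h1, h2, h3⟩
        · left; exact h
        · right
          refine ⟨h1, by simp at h2 ⊢; omega, ?_⟩
          intro x hx
          rcases h3 x hx with h | h
          · rcases List.mem_cons.mp h with h | h
            · right; simp [h]
            · left; exact h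
          · right; simp [h]

-- a newline-free string splits to itself
theorem go_no_sep (fuel : Nat) : ∀ (l cur : List Char) (acc : List (List Char)),
    l.length < fuel → '\n' ∉ l →
    PySem.Chars.splitOn.go ['\n'] fuel l cur acc = ((cur.reverse ++ l) :: acc).reverse := by
  induction fuel with
  | zero => intro l cur acc h; omega
  | succ fuel ih =>
    intro l cur acc hf hl
    match l with
    | [] =>
      rw [PySem.Chars.splitOn.go]
      · simp
      · simp
    | c :: rest =>
      rw [PySem.Chars.splitOn.go]
      have hc : c ≠ '\n' := fun h => hl (by simp [h])
      rw [if_neg (by simp [List.isPrefixOf]; exact fun h => absurd h.symm hc)]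
      rw [ih rest (c :: cur) acc (by simp at hf ⊢; omega) (fun h => hl (by simp [h]))]
      simp

theorem splitOn_no_sep (s : List Char) (h : '\n' ∉ s) :
    PySem.Chars.splitOn s ['\n'] = [s] := by
  rw [PySem.Chars.splitOn, go_no_sep (s.length + 1) s [] [] (by omega) h]
  simp

-- pyRange with positive step: structural cons / nil / shift-to-zero
theorem pyRange_pos_nil (a b s : Int) (hs : 0 < s) (h : b ≤ a) :
    PySem.List.pyRange a b s = [] := by
  rw [PySem.List.pyRange_of_pos a b hs, if_neg (by omega)]
  simp

theorem pyRange_pos_cons (a b s : Int) (hs : 0 < s) (h : a < b) :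
    PySem.List.pyRange a b s = a :: PySem.List.pyRange (a+s) b s := by
  rw [PySem.List.pyRange_of_pos a b hs, PySem.List.pyRange_of_pos (a+s) b hs, if_pos h]
  have key : ((b - a + s - 1) / s).toNat
      = (if a + s < b then ((b - (a + s) + s - 1) / s).toNat else 0) + 1 := by
    by_cases h2 : a + s < b
    · rw [if_pos h2]
      have e1 : b - a + s - 1 = (b - (a+s) + s - 1) + 1 * s := by ring
      rw [e1, Int.add_mul_ediv_right _ _ (by omega)]
      have : 0 ≤ (b - (a+s) + s - 1) / s := Int.ediv_nonneg (by omega) (by omega)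
      omega
    · rw [if_neg h2]
      have h1 : (b - a + s - 1) / s = 1 := by
        rw [← PySem.Int.floordiv_eq_ediv_of_pos (a := b - a + s - 1) hs]
        exact (PySem.Int.floordiv_eq_iff_of_pos (a := b - a + s - 1) (b := s) (q := 1) hs).mpr ⟨by omega, by omega⟩
      omega
  rw [key, List.range_succ_eq_map, List.map_cons, List.map_map]
  simp only [Nat.cast_zero, mul_zero, add_zero]
  refine congrArg _ ?_
  apply List.map_congr_left
  intro k hk
  simp only [Function.comp_apply]
  push_cast
  ring

theorem pyRange_shift (a b s : Int) (hs : 0 < s) :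
    PySem.List.pyRange a b s = (PySem.List.pyRange 0 (b - a) s).map (a + ·) := by
  rw [PySem.List.pyRange_of_pos a b hs, PySem.List.pyRange_of_pos 0 (b-a) hs, List.map_map]
  have : (b - a - 0 + s - 1) = (b - a + s - 1) := by ring
  rw [this]
  have hif : (if a < b then ((b - a + s - 1) / s).toNat else 0)
      = (if 0 < b - a then ((b - a + s - 1) / s).toNat else 0) := by
    by_cases h : a < b
    · rw [if_pos h, if_pos (by omega)]
    · rw [if_neg h, if_neg (by omega)]
  rw [hif]
  apply List.map_congr_left
  intro k hk
  simp only [Function.comp_apply]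
  ring

-- B's per-line chunk loop (as a flatMap) equals the reference chunking, for a nonempty line
theorem chunks_flat (Lp : Nat) : ∀ (n : Nat) (line : List Char), line.length = n → line ≠ [] →
    (PySem.List.pyRange 0 (line.length : Int) ((Lp+1 : Nat) : Int)).flatMap
      (fun i => PySem.List.slice line (some i) (some (i + ((Lp+1 : Nat) : Int))) ++ ['\n'])
    = chunksAux Lp line := by
  intro n
  induction n using Nat.strong_induction_on with
  | _ n ih =>
    intro line hlen hne
    obtain ⟨c, rest, rfl⟩ := List.exists_cons_of_ne_nil hne
    have hL : (0:Int) < ((Lp+1 : Nat) : Int) := by exact_mod_cast Nat.succ_pos Lp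
    subst hlen
    have h0 : (0:Int) < ((c :: rest).length : Int) := by
      simp only [List.length_cons]; push_cast; omega
    rw [pyRange_pos_cons _ _ _ hL h0, List.flatMap_cons]
    have hg0 : PySem.List.slice (c :: rest) (some 0) (some (0 + ((Lp+1 : Nat) : Int))) ++ ['\n']
        = (c :: rest).take (Lp+1) ++ ['\n'] := by
      rw [zero_add, PySem.List.slice_zero_start, PySem.List.slice_to_natCast]
    rw [hg0]
    by_cases hc : (c :: rest).length ≤ Lp + 1
    · rw [pyRange_pos_nil _ _ _ hL (by push_cast; omega), List.flatMap_nil, List.append_nil]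
      rw [chunksAux, if_pos hc, List.take_of_length_le hc]
    · rw [zero_add, pyRange_shift _ _ _ hL, List.flatMap_map]
      have hrw : ∀ i ∈ PySem.List.pyRange 0 (((c :: rest).length : Int) - ((Lp+1 : Nat) : Int)) ((Lp+1 : Nat) : Int),
          (PySem.List.slice (c :: rest) (some (((Lp+1 : Nat) : Int) + i)) (some ((((Lp+1 : Nat) : Int) + i) + ((Lp+1 : Nat) : Int))) ++ ['\n'])
          = (PySem.List.slice ((c :: rest).drop (Lp+1)) (some i) (some (i + ((Lp+1 : Nat) : Int))) ++ ['\n']) := by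
        intro i hi
        have h0i : 0 ≤ i := ((PySem.List.mem_pyRange_iff_of_pos hL i).mp hi).1
        obtain ⟨j, rfl⟩ : ∃ j : Nat, i = (j : Int) := ⟨i.toNat, by omega⟩
        have e1 : ((Lp+1 : Nat) : Int) + (j : Int) = ((Lp+1+j : Nat) : Int) := by push_cast; ring
        rw [e1, PySem.List.slice_natCast_add, PySem.List.slice_natCast_add, List.drop_drop]
      rw [List.flatMap_congr hrw]
      have hdlen : (((c :: rest).drop (Lp+1)).length : Int) = ((c :: rest).length : Int) - ((Lp+1 : Nat) : Int) := by
        simp only [List.length_drop]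
        simp only [List.length_cons] at hc ⊢
        push_cast
        omega
      rw [← hdlen]
      rw [ih ((c :: rest).drop (Lp+1)).length (by simp only [List.length_drop, List.length_cons] at hc ⊢; omega) _ rfl
        (by simp only [List.length_cons] at hc; intro hnil; have := congrArg List.length hnil; simp at this; omega)]
      rw [chunksAux, if_neg hc]
      simp

-- A's recursion on a single newline-free nonempty line equals the reference chunking
theorem foldA_line (Lp : Nat) : ∀ (fuel : Nat) (line : List Char), line ≠ [] → '\n' ∉ line →
    line.length ≤ fuel →
    foldAAux fuel line ((Lp+1 : Nat) : Int) = chunksAux Lp line := by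
  intro fuel
  induction fuel with
  | zero =>
    intro line hne hnl hle
    exact absurd (List.length_eq_zero_iff.mp (by omega)) hne
  | succ fuel ih =>
    intro line hne hnl hle
    rw [foldAAux, splitOn_no_sep line hnl, List.foldl_cons, List.foldl_nil]
    obtain ⟨c, rest, rfl⟩ := List.exists_cons_of_ne_nil hne
    by_cases hgt : ((Lp+1 : Nat) : Int) < ((c :: rest).length : Int)
    · rw [if_pos hgt, PySem.List.slice_to_natCast, PySem.List.slice_from_natCast]
      rw [ih ((c :: rest).drop (Lp+1))
        (by intro hnil; have := congrArg List.length hnil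
            simp only [List.length_drop, List.length_cons] at this hgt
            push_cast at hgt; simp at this; omega)
        (fun h => hnl (List.drop_subset _ _ h))
        (by simp only [List.length_drop, List.length_cons] at hgt hle ⊢
            push_cast at hgt; omega)]
      rw [chunksAux, if_neg (by simp only [List.length_cons] at hgt ⊢; push_cast at hgt; omega)]
      simp
    · rw [if_neg hgt]
      rw [chunksAux, if_pos (by simp only [List.length_cons] at hgt ⊢; push_cast at hgt; omega)]
      simp

-- ===== VERDICT (by name: the statement is the Claim_ definition above) =====
theorem fold_row_tolength_spec : Claim_equal_fold_row_tolength := by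
  intro source length hdom hpre
  unfold Spec_fold_row_tolength fold_row_tolength fold_row_tolength_alt
  rw [foldAAux]
  refine congrArg String.ofList ?_
  rcases hpre with hL | ⟨hz, hall⟩
  · -- length ≥ 1
    obtain ⟨Lp, hLp⟩ : ∃ Lp : Nat, length = ((Lp+1 : Nat) : Int) :=
      ⟨length.toNat - 1, by push_cast; omega⟩
    subst hLp
    apply PySem.List.foldl_congr_mem
    intro acc line hmem
    have hinv := go_inv (source.toList.length + 1) source.toList [] []
      (by omega) (by simp) line hmem
    rcases hinv with h | ⟨hnl, hlen, -⟩
    · simp at h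
    simp only [List.length_nil, Nat.zero_add] at hlen
    by_cases hgt : ((Lp+1 : Nat) : Int) < ((line.length : Nat) : Int)
    · rw [if_pos hgt, if_neg (by omega)]
      have hne : line ≠ [] := by
        intro hnil; subst hnil; simp at hgt; omega
      obtain ⟨c, rest, rfl⟩ := List.exists_cons_of_ne_nil hne
      rw [PySem.List.slice_to_natCast, PySem.List.slice_from_natCast]
      rw [foldA_line Lp (source.toList.length)
        (((c :: rest).drop (Lp+1)))
        (by intro hnil; have := congrArg List.length hnil
            simp only [List.length_drop, List.length_cons] at this
            simp only [List.length_cons] at hgt; push_cast at hgt; simp at this; omega)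
        (fun h => hnl (List.drop_subset _ _ h))
        (by simp only [List.length_drop, List.length_cons] at hgt hlen ⊢
            push_cast at hgt; omega)]
      have hflat := PySem.List.foldl_congr_mem
        (l := PySem.List.pyRange 0 ((c :: rest).length : Int) ((Lp+1 : Nat) : Int))
        (init := acc)
        (f := fun result i => result ++ PySem.List.slice (c :: rest) (some i) (some (i + ((Lp+1 : Nat) : Int))) ++ ['\n'])
        (g := fun result i => result ++ (PySem.List.slice (c :: rest) (some i) (some (i + ((Lp+1 : Nat) : Int))) ++ ['\n']))
        (by intro a x hx; exact List.append_assoc _ _ _)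
      rw [hflat, PySem.List.foldl_append_eq_flatMap,
        chunks_flat Lp (c :: rest).length (c :: rest) rfl hne]
      rw [chunksAux, if_neg (by simp only [List.length_cons] at hgt ⊢; push_cast at hgt; omega)]
      simp
    · rw [if_neg hgt, if_pos (by omega)]
  · -- length = 0, source is all newlines
    subst hz
    apply PySem.List.foldl_congr_mem
    intro acc line hmem
    have hinv := go_inv (source.toList.length + 1) source.toList [] []
      (by omega) (by simp) line hmem
    rcases hinv with h | ⟨hnl, -, hsub⟩
    · simp at h
    have hline : line = [] := by
      rcases line with _ | ⟨c, cs⟩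
      · rfl
      · exfalso
        rcases hsub c (by simp) with h | h
        · simp at h
        · have : c = '\n' := by
            have := List.all_eq_true.mp hall c h
            simpa using this
          exact hnl (by simp [this])
    subst hline
    simp
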